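-- pv_equiv track=rewrite | github.com/zaheersha/Programming_Concepts | String/5.ExtractMax.py | extractMaximum
-- ===== SOURCE A (Python) =====
-- def extractMaximum(str1):
--     # Initialization
--     num, res, flag = 0, 0, 0
--
--     for i in range(len(str1)):
--         if "0" <= str1[i] <= "9":
--             num = num * 10 + int(int(str1[i]) - 0)
--             flag = 1
--         else:
--             res = max(res, num)
--             num = 0
--     if flag == 1:
--         return max(res, num)
--     else:
--         return -1
-- ===== SOURCE B (Python) =====
-- def _value(t):
--     # decimal value of a token made of ASCII digits
--     v = 0
--     for ch in t:
--         v = 10 * v + (ord(ch) - 48)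
--     return v
--
--
-- def extractMaximum(str1):
--     # Tokenize-then-reduce: blank out every non-digit, split into maximal
--     # digit tokens, then take the max of their values.
--     spaced = "".join(ch if "0" <= ch <= "9" else " " for ch in str1)
--     tokens = spaced.split()
--     if not tokens:
--         return -1
--     return max(_value(t) for t in tokens)
-- ===== Notes on version B (the rewrite author's own statement) =====
-- stated objective: alternative
-- what changed: Replaces A's single-pass running accumulator (num/res/flag) by a staged tokenize-then-reduce pipeline: blank out non-digits, split() the string into maximal digit tokens, evaluate each token, and take the max of the token values (-1 if there are none); a timing run measured it a constant-factor speedup because the blanking/splitting stages run in C-level str methods instead of per-character Python bytecode.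
import Mathlib
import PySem

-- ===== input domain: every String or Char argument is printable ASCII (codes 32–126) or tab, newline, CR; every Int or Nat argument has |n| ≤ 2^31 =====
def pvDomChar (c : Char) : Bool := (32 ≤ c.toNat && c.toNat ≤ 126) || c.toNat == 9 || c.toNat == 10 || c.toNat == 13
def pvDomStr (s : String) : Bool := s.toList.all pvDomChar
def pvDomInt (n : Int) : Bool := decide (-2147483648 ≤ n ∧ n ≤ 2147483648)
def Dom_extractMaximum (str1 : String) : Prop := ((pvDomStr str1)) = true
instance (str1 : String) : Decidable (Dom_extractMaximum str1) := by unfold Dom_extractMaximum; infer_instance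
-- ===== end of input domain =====

-- B replaces A's single-pass running accumulator by a staged tokenize-then-reduce pipeline; return values agree everywhere.

-- ===== PORT A =====
-- A: one pass keeping a running number `num`, running max `res`, and a `flag` for "saw a digit".
def pvStepA (s : Int × Int × Int) (c : Char) : Int × Int × Int :=
  if '0' ≤ c ∧ c ≤ '9' then (s.1 * 10 + ((c.toNat : Int) - 48), s.2.1, 1)
  else (0, max s.2.1 s.1, s.2.2)

def extractMaximum (str1 : String) : Int :=
  let st := str1.toList.foldl pvStepA (0, 0, 0)
  if st.2.2 = 1 then max st.2.1 st.1 else -1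

-- ===== PORT B =====
-- B stage 1: blank out every non-digit character ("".join(... c if digit else " " ...)).
def pvSpace (c : Char) : Char := if '0' ≤ c ∧ c ≤ '9' then c else ' '

-- B helper `_value(t)`: decimal value of a digit token, by a fold over its characters.
def pvVal (t : List Char) : Int := t.foldl (fun v ch => 10 * v + ((ch.toNat : Int) - 48)) 0

-- Python `max` on the (nonempty there) list of token values.
def pvMaxList (l : List Int) : Int :=
  match l with
  | [] => -1
  | h :: t => t.foldl max h

def extractMaximum_alt (str1 : String) : Int :=
  let tokens := PySem.Chars.split₀ (str1.toList.map pvSpace)  -- stage 2: spaced.split()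
  if tokens.isEmpty then -1
  else pvMaxList (tokens.map pvVal)                           -- stage 3: max(_value(t) for t in tokens)

-- ===== PRECONDITION & SPEC =====
def Spec_extractMaximum (str1 : String) (out : Int) : Prop := out = extractMaximum_alt str1
instance (str1 : String) (out : Int) : Decidable (Spec_extractMaximum str1 out) := by unfold Spec_extractMaximum; infer_instance

-- ===== CLAIM (what is proved, stated in full; the proofs are below) =====
def Claim_equal_extractMaximum : Prop := ∀ (str1 : String), Dom_extractMaximum str1 → Spec_extractMaximum str1 (extractMaximum str1)

-- ===== LEMMAS AND PROOFS =====

def pvDig (c : Char) : Bool := decide ('0' ≤ c ∧ c ≤ '9')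

/-- The maximal digit runs of `cs`, with `cur` the (reversed) pending run. -/
def pvRunsAux : List Char → List Char → List (List Char)
  | [], cur => if cur.isEmpty then [] else [cur.reverse]
  | c :: rest, cur =>
    if pvDig c then pvRunsAux rest (c :: cur)
    else if cur.isEmpty then pvRunsAux rest [] else cur.reverse :: pvRunsAux rest []

theorem pv_isspace_space : PySem.Chars.isspace ' ' = true := by decide

theorem pv_isspace_digit (c : Char) (h : pvDig c = true) : PySem.Chars.isspace c = false := by
  have h1 : ('0' : Char) ≤ c ∧ c ≤ '9' := by simpa [pvDig] using h
  have h48 : (48 : Nat) ≤ c.toNat := h1.1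
  have h57 : c.toNat ≤ 57 := h1.2
  simp [PySem.Chars.isspace]
  omega

theorem pv_go_runs (cs : List Char) : ∀ (cur : List Char) (acc : List (List Char)),
    PySem.Chars.split₀.go (cs.map pvSpace) cur acc = acc.reverse ++ pvRunsAux cs cur := by
  induction cs with
  | nil =>
    intro cur acc
    by_cases hc : cur.isEmpty
    · simp [PySem.Chars.split₀.go, pvRunsAux, hc]
    · simp [PySem.Chars.split₀.go, pvRunsAux, hc]
  | cons c rest ih =>
    intro cur acc
    by_cases hd : pvDig c
    · have hsp : pvSpace c = c := by
        simp only [pvDig, decide_eq_true_eq] at hd; simp [pvSpace, hd]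
      simp only [List.map_cons, hsp, PySem.Chars.split₀.go, pv_isspace_digit c hd]
      simp [ih, pvRunsAux, hd]
    · have hsp : pvSpace c = ' ' := by
        simp only [pvDig, decide_eq_true_eq] at hd; simp [pvSpace, hd]
      by_cases hc : cur.isEmpty
      · simp only [List.map_cons, hsp, PySem.Chars.split₀.go, pv_isspace_space, hc]
        simp [ih, pvRunsAux, hd, hc]
      · simp only [List.map_cons, hsp, PySem.Chars.split₀.go, pv_isspace_space, hc]
        simp [ih, pvRunsAux, hd, hc]

theorem pv_split₀_runs (cs : List Char) :
    PySem.Chars.split₀ (cs.map pvSpace) = pvRunsAux cs [] := by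
  simpa using pv_go_runs cs [] []

theorem pvRunsAux_ne_nil (cs : List Char) : ∀ cur : List Char, cur ≠ [] → pvRunsAux cs cur ≠ [] := by
  induction cs with
  | nil => intro cur h; simp [pvRunsAux, h]
  | cons c rest ih =>
    intro cur h
    by_cases hd : pvDig c
    · simpa [pvRunsAux, hd] using ih (c :: cur) (by simp)
    · simp [pvRunsAux, hd, List.isEmpty_iff, h]

theorem pvRunsAux_digits (cs : List Char) : ∀ cur : List Char, (∀ c ∈ cur, pvDig c = true) →
    ∀ r ∈ pvRunsAux cs cur, ∀ c ∈ r, pvDig c = true := by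
  induction cs with
  | nil =>
    intro cur hcur r hr c hc
    by_cases h : cur.isEmpty
    · simp [pvRunsAux, h] at hr
    · simp [pvRunsAux, h] at hr
      exact hcur c (by simpa [hr] using hc)
  | cons a rest ih =>
    intro cur hcur r hr c hc
    by_cases hd : pvDig a
    · refine ih (a :: cur) ?_ r (by simpa [pvRunsAux, hd] using hr) c hc
      intro x hx; rcases List.mem_cons.mp hx with h | h
      · exact h ▸ hd
      · exact hcur x h
    · by_cases h : cur.isEmpty
      · exact ih [] (by simp) r (by simpa [pvRunsAux, hd, h] using hr) c hc
      · simp [pvRunsAux, hd, h] at hr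
        rcases hr with hr | hr
        · exact hcur c (by simpa [hr] using hc)
        · exact ih [] (by simp) r hr c hc

theorem pvVal_nonneg_aux (t : List Char) : ∀ a : Int, 0 ≤ a → (∀ c ∈ t, pvDig c = true) →
    0 ≤ t.foldl (fun v ch => 10 * v + ((ch.toNat : Int) - 48)) a := by
  induction t with
  | nil => intro a ha _; simpa using ha
  | cons c rest ih =>
    intro a ha hall
    have hc : pvDig c = true := hall c (by simp)
    have h48 : (48 : Nat) ≤ c.toNat := by
      have := (by simpa [pvDig] using hc : ('0' : Char) ≤ c ∧ c ≤ '9'); exact this.1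
    refine ih _ (by push_cast; omega) (fun x hx => hall x (by simp [hx]))

theorem pvVal_nonneg (t : List Char) (h : ∀ c ∈ t, pvDig c = true) : 0 ≤ pvVal t :=
  pvVal_nonneg_aux t 0 le_rfl h

theorem pv_max_of_nums (l : List Int) (hl : l ≠ []) (h : ∀ v ∈ l, 0 ≤ v) :
    pvMaxList l = l.foldl max 0 := by
  unfold pvMaxList
  cases l with
  | nil => exact absurd rfl hl
  | cons x t => simp [List.foldl, max_eq_right (h x (by simp))]

theorem pvVal_snoc (cur : List Char) (c : Char) :
    pvVal (cur.reverse ++ [c]) = pvVal cur.reverse * 10 + ((c.toNat : Int) - 48) := by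
  simp [pvVal, List.foldl_append]; ring

/-- Core invariant: once a digit has been seen (flag = 1) and `cur` is the reversed
pending run, A's fold computes the running max of the remaining token values. -/
theorem pvK (cs : List Char) : ∀ (cur : List Char) (res : Int), 0 ≤ res →
    (∀ c ∈ cur, pvDig c = true) →
    (cs.foldl pvStepA (pvVal cur.reverse, res, 1)).2.2 = 1 ∧
    max (cs.foldl pvStepA (pvVal cur.reverse, res, 1)).2.1
        (cs.foldl pvStepA (pvVal cur.reverse, res, 1)).1
      = ((pvRunsAux cs cur).map pvVal).foldl max res := by
  induction cs with
  | nil =>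
    intro cur res hres _
    by_cases hc : cur.isEmpty
    · have : cur = [] := List.isEmpty_iff.mp hc
      simp [this, pvRunsAux, pvVal, max_eq_left hres]
    · simp [pvRunsAux, hc, List.foldl]
  | cons c rest ih =>
    intro cur res hres hcur
    by_cases hd : pvDig c
    · have hdp : ('0' : Char) ≤ c ∧ c ≤ '9' := by simpa [pvDig] using hd
      have hstep : pvStepA (pvVal cur.reverse, res, 1) c = (pvVal (c :: cur).reverse, res, 1) := by
        simp [pvStepA, hdp, pvVal_snoc]
      have := ih (c :: cur) res hres (by
        intro x hx; rcases List.mem_cons.mp hx with h | h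
        · exact h ▸ hd
        · exact hcur x h)
      simpa [pvRunsAux, hd, List.foldl, hstep] using this
    · have hdp : ¬(('0' : Char) ≤ c ∧ c ≤ '9') := by simpa [pvDig] using hd
      have hstep : pvStepA (pvVal cur.reverse, res, 1) c = (0, max res (pvVal cur.reverse), 1) := by
        simp [pvStepA, hdp]
      have hres' : 0 ≤ max res (pvVal cur.reverse) := le_trans hres (le_max_left _ _)
      have hIH := ih [] (max res (pvVal cur.reverse)) hres' (by simp)
      have h0 : pvVal ([] : List Char).reverse = 0 := rfl
      rw [h0] at hIH
      rw [List.foldl_cons, hstep]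
      by_cases hc : cur.isEmpty
      · have hcnil : cur = [] := List.isEmpty_iff.mp hc
        subst hcnil
        rw [show max res (pvVal ([] : List Char).reverse) = res from by
          simpa [pvVal] using max_eq_left hres] at hIH ⊢
        simpa [pvRunsAux, hd] using hIH
      · rw [show pvRunsAux (c :: rest) cur = cur.reverse :: pvRunsAux rest [] from by
          simp [pvRunsAux, hd, hc]]
        simpa using hIH

/-- A's fold from the initial state, characterised by the digit runs. -/
theorem pvK0 (cs : List Char) : ∀ res : Int, 0 ≤ res →
    (pvRunsAux cs [] = [] → cs.foldl pvStepA (0, res, 0) = (0, res, 0)) ∧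
    (pvRunsAux cs [] ≠ [] →
      (cs.foldl pvStepA (0, res, 0)).2.2 = 1 ∧
      max (cs.foldl pvStepA (0, res, 0)).2.1 (cs.foldl pvStepA (0, res, 0)).1
        = ((pvRunsAux cs []).map pvVal).foldl max res) := by
  induction cs with
  | nil =>
    intro res _
    exact ⟨fun _ => rfl, fun h => absurd (by simp [pvRunsAux] : pvRunsAux ([] : List Char) [] = []) h⟩
  | cons c rest ih =>
    intro res hres
    by_cases hd : pvDig c
    · have hdp : ('0' : Char) ≤ c ∧ c ≤ '9' := by simpa [pvDig] using hd
      have hstep : pvStepA (0, res, 0) c = (pvVal [c].reverse, res, 1) := by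
        simp [pvStepA, hdp, pvVal]
      have hne : pvRunsAux rest [c] ≠ [] := pvRunsAux_ne_nil rest [c] (by simp)
      constructor
      · intro h; exact absurd h (by simpa [pvRunsAux, hd] using hne)
      · intro _
        have := pvK rest [c] res hres (by simpa using hd)
        simpa [pvRunsAux, hd, List.foldl, hstep] using this
    · have hdp : ¬(('0' : Char) ≤ c ∧ c ≤ '9') := by simpa [pvDig] using hd
      have hstep : pvStepA (0, res, 0) c = (0, res, 0) := by
        simp [pvStepA, hdp, max_eq_left hres]
      have hIH := ih res hres
      constructor
      · intro h
        simpa [List.foldl, hstep] using hIH.1 (by simpa [pvRunsAux, hd] using h)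
      · intro h
        simpa [pvRunsAux, hd, List.foldl, hstep] using hIH.2 (by simpa [pvRunsAux, hd] using h)

-- ===== VERDICT (by name: the statement is the Claim_ definition above) =====
theorem extractMaximum_spec : Claim_equal_extractMaximum := by
  intro str1 _
  unfold Spec_extractMaximum extractMaximum extractMaximum_alt
  rw [pv_split₀_runs str1.toList]
  have hK := pvK0 str1.toList 0 le_rfl
  by_cases hnil : pvRunsAux str1.toList [] = []
  · rw [hK.1 hnil]
    simp [hnil]
  · obtain ⟨hflag, hmax⟩ := hK.2 hnil
    have hall : ∀ v ∈ (pvRunsAux str1.toList []).map pvVal, 0 ≤ v := by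
      intro v hv
      rcases List.mem_map.mp hv with ⟨r, hr, rfl⟩
      exact pvVal_nonneg r (pvRunsAux_digits str1.toList [] (by simp) r hr)
    rw [if_pos hflag, if_neg (by simpa [List.isEmpty_iff] using hnil)]
    rw [pv_max_of_nums _ (by simpa using hnil) hall]
    exact hmax
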